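-- pv_equiv track=rewrite | github.com/hsherkat/AOC2020 | day14.py | get_addresses_recursive
-- ===== SOURCE A (Python) =====
-- from typing import Tuple, Union, List
--
-- def get_addresses_recursive(addr_Xs: List[str]) -> List[str]:
--     out = []
--     for addr in addr_Xs:
--         idx = addr.find("X")
--         if idx == -1:
--             out.append(addr)
--         else:
--             out.extend(get_addresses_recursive([addr[:idx] + "0" + addr[idx + 1 :]]))
--             out.extend(get_addresses_recursive([addr[:idx] + "1" + addr[idx + 1 :]]))
--     return out
-- ===== SOURCE B (Python) =====
-- def get_addresses_recursive(addr_Xs):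
--     # Iterative frontier expansion: instead of recursing per string, walk the
--     # positions of each address once, doubling the list of partial templates at
--     # every 'X'.  Expanding left-to-right with '0' before '1' reproduces A's
--     # depth-first output order exactly.
--     out = []
--     for addr in addr_Xs:
--         templates = [list(addr)]
--         for p, c in enumerate(addr):
--             if c == "X":
--                 templates = [t[:p] + [b] + t[p + 1:] for t in templates for b in "01"]
--         out.extend("".join(t) for t in templates)
--     return out
-- ===== Notes on version B (the rewrite author's own statement) =====
-- stated objective: alternative
-- what changed: Replaces A's divide-and-conquer recursion on singleton lists (re-finding the first X and rebuilding the string at every level) with a single left-to-right pass over each address's positions that doubles a frontier list of templates at every X.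
import Mathlib
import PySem

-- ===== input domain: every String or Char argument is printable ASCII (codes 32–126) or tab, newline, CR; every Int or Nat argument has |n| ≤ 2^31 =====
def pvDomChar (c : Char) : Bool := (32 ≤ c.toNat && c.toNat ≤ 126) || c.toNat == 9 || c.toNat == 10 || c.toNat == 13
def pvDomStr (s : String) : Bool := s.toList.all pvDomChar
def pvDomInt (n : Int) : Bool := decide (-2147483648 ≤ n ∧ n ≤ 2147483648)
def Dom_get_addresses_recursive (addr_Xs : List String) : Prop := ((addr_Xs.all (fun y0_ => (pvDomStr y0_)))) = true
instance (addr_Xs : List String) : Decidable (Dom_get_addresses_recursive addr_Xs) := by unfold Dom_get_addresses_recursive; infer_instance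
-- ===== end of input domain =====

-- B replaces A's per-string divide-and-conquer recursion by one flat left-to-right pass
-- that doubles a frontier of templates at every 'X' (objective: alternative).

-- ===== PORT A =====
-- A: addr[:idx] + b + addr[idx+1:] with idx = addr.find("X"), as a char list (String
-- concatenation itself is kernel-opaque, so the three pieces are concatenated on
-- .toList and rebuilt with String.ofList; exact).
def pvSubst (addr : String) (b : Char) : String :=
  String.ofList ((PySem.Str.slice addr none (some (PySem.Str.find addr "X"))).toList
    ++ [b] ++ (PySem.Str.slice addr (some (PySem.Str.find addr "X" + 1)) none).toList)

-- The next four lemmas support port A's termination argument (decreasing_by cites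
-- pvCount_subst): substituting a non-'X' char at the first 'X' lowers the 'X'-count.
theorem pv_find (s : String) : PySem.Str.find s "X" = PySem.Chars.find s.toList ['X'] := by
  have hX : ("X" : String).toList = ['X'] := by decide
  simp [hX]

theorem pv_drop_find (s : String) (h0 : 0 ≤ PySem.Chars.find s.toList ['X']) :
    s.toList.drop (PySem.Chars.find s.toList ['X']).toNat
      = 'X' :: s.toList.drop ((PySem.Chars.find s.toList ['X']).toNat + 1) := by
  obtain ⟨hpre, -⟩ := PySem.Chars.find_spec h0
  obtain ⟨t, ht⟩ := hpre
  have : t = (s.toList.drop (PySem.Chars.find s.toList ['X']).toNat).tail := by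
    rw [← ht]; rfl
  rw [List.tail_drop] at this
  rw [← ht, this]
  rfl

theorem pvSubst_toList (s : String) (b : Char)
    (h : ¬ PySem.Str.find s "X" = -1) :
    (pvSubst s b).toList
    = s.toList.take (PySem.Chars.find s.toList ['X']).toNat
      ++ b :: s.toList.drop ((PySem.Chars.find s.toList ['X']).toNat + 1) := by
  have h0 : 0 ≤ PySem.Chars.find s.toList ['X'] := by
    have := PySem.Chars.neg_one_le_find s.toList ['X']
    rw [pv_find s] at h; omega
  unfold pvSubst
  rw [String.toList_ofList]
  simp only [PySem.Str.toList_slice, PySem.Chars.slice_eq_listSlice, pv_find]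
  rw [PySem.List.slice_to _ h0, PySem.List.slice_from _ (by omega)]
  have : (PySem.Chars.find s.toList ['X'] + 1).toNat
      = (PySem.Chars.find s.toList ['X']).toNat + 1 := by omega
  rw [this]
  simp

theorem pvCount_subst (s : String) (b : Char) (hb : b ≠ 'X')
    (h : ¬ PySem.Str.find s "X" = -1) :
    (pvSubst s b).toList.count 'X' + 1 = s.toList.count 'X' := by
  have h0 : 0 ≤ PySem.Chars.find s.toList ['X'] := by
    have := PySem.Chars.neg_one_le_find s.toList ['X']
    rw [pv_find s] at h; omega
  rw [pvSubst_toList s b h]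
  conv_rhs => rw [← List.take_append_drop (PySem.Chars.find s.toList ['X']).toNat s.toList]
  rw [pv_drop_find s h0]
  simp [List.count_append, hb]
  omega

-- A, transliterated: the for-loop over addr_Xs is the structural recursion, each
-- iteration appending the branch for the head (`out.append` / two `out.extend`s).
def get_addresses_recursive : List String → List String
  | [] => []
  | addr :: rest =>
    (if PySem.Str.find addr "X" = -1 then [addr]
     else
       get_addresses_recursive [pvSubst addr '0'] ++ get_addresses_recursive [pvSubst addr '1'])
    ++ get_addresses_recursive rest
termination_by l => (l.map fun s => 2 ^ (s.toList.count 'X' + 1)).sum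
decreasing_by
  · have := pvCount_subst addr '0' (by decide) (by assumption)
    simp only [List.map_cons, List.map_nil, List.sum_cons, List.sum_nil]
    have h2 : (2:Nat) ^ ((pvSubst addr '0').toList.count 'X' + 1) < 2 ^ (addr.toList.count 'X' + 1) := by
      apply Nat.pow_lt_pow_right (by norm_num); omega
    omega
  · have := pvCount_subst addr '1' (by decide) (by assumption)
    simp only [List.map_cons, List.map_nil, List.sum_cons, List.sum_nil]
    have h2 : (2:Nat) ^ ((pvSubst addr '1').toList.count 'X' + 1) < 2 ^ (addr.toList.count 'X' + 1) := by
      apply Nat.pow_lt_pow_right (by norm_num); omega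
    omega
  · simp only [List.map_cons, List.sum_cons]
    have : (0:Nat) < 2 ^ (addr.toList.count 'X' + 1) := Nat.two_pow_pos _
    omega

-- ===== PORT B =====
-- B: `templates = [t[:p] + [b] + t[p+1:] for t in templates for b in "01"]`, guarded by `c == "X"`.
def pvExpandStep (ts : List (List Char)) (pc : Int × Char) : List (List Char) :=
  if pc.2 == 'X' then
    ts.flatMap (fun t => ['0', '1'].map (fun b =>
      PySem.List.slice t none (some pc.1) ++ [b] ++ PySem.List.slice t (some (pc.1 + 1)) none))
  else ts

-- B: per-address body — run the frontier over `enumerate(addr)`, then `"".join` each template.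
def pvExpandOne (addr : String) : List String :=
  ((PySem.List.enumerate addr.toList 0).foldl pvExpandStep [addr.toList]).map
    (fun t => String.ofList t)

def get_addresses_recursive_alt (addr_Xs : List String) : List String :=
  addr_Xs.foldl (fun out addr => out ++ pvExpandOne addr) []

-- ===== PRECONDITION & SPEC =====
def Spec_get_addresses_recursive (addr_Xs : List String) (out : List String) : Prop := out = get_addresses_recursive_alt addr_Xs
instance (addr_Xs : List String) (out : List String) : Decidable (Spec_get_addresses_recursive addr_Xs out) := by unfold Spec_get_addresses_recursive; infer_instance

-- ===== CLAIM (what is proved, stated in full; the proofs are below) =====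
def Claim_equal_get_addresses_recursive : Prop := ∀ (addr_Xs : List String), Dom_get_addresses_recursive addr_Xs → Spec_get_addresses_recursive addr_Xs (get_addresses_recursive addr_Xs)

-- ===== LEMMAS AND PROOFS =====

theorem pv_foldl_noX (l : List Char) (st : Int) (ts : List (List Char)) (h : 'X' ∉ l) :
    (PySem.List.enumerate l st).foldl pvExpandStep ts = ts := by
  induction l generalizing st ts with
  | nil => simp [PySem.List.enumerate_nil]
  | cons c l ih =>
    rw [PySem.List.enumerate_cons]
    simp only [List.foldl_cons]
    have hc : c ≠ 'X' := by intro hc; exact h (hc ▸ List.mem_cons_self)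
    rw [show pvExpandStep ts (st, c) = ts from by simp [pvExpandStep, hc]]
    exact ih (st + 1) ts (fun hm => h (List.mem_cons_of_mem _ hm))

theorem pv_foldl_append (l : List (Int × Char)) (ts1 ts2 : List (List Char)) :
    l.foldl pvExpandStep (ts1 ++ ts2) = l.foldl pvExpandStep ts1 ++ l.foldl pvExpandStep ts2 := by
  induction l generalizing ts1 ts2 with
  | nil => rfl
  | cons pc l ih =>
    simp only [List.foldl_cons]
    rw [show pvExpandStep (ts1 ++ ts2) pc = pvExpandStep ts1 pc ++ pvExpandStep ts2 pc from by
      unfold pvExpandStep; split <;> simp]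
    exact ih _ _

theorem pv_step_X (i : Nat) (t : List Char) :
    pvExpandStep [t] ((i : Int), 'X')
      = [t.take i ++ '0' :: t.drop (i + 1), t.take i ++ '1' :: t.drop (i + 1)] := by
  unfold pvExpandStep
  have h1 : ((i : Int) + 1) = ((i + 1 : Nat) : Int) := by push_cast; ring
  simp only [beq_self_eq_true, if_pos, List.flatMap_cons, List.flatMap_nil, List.map_cons,
    List.map_nil, List.append_nil, h1, PySem.List.slice_to_natCast, PySem.List.slice_from_natCast]
  simp

theorem pv_noX_take (cs : List Char) (h0 : 0 ≤ PySem.Chars.find cs ['X']) :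
    'X' ∉ cs.take (PySem.Chars.find cs ['X']).toNat := by
  obtain ⟨-, hmin⟩ := PySem.Chars.find_spec h0
  intro hmem
  obtain ⟨j, hj, hget⟩ := List.getElem_of_mem hmem
  have hjlt : j < (PySem.Chars.find cs ['X']).toNat := lt_of_lt_of_le hj (by simp)
  have hjlen : j < cs.length := by
    have h2 := hj
    rw [List.length_take] at h2
    omega
  refine hmin j hjlt ⟨cs.drop (j + 1), ?_⟩
  rw [List.getElem_take] at hget
  simp only [List.singleton_append]
  rw [← hget]
  exact List.getElem_cons_drop hjlen

theorem pv_expandOne_split (s : String) (h : ¬ PySem.Str.find s "X" = -1) :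
    pvExpandOne s = pvExpandOne (pvSubst s '0') ++ pvExpandOne (pvSubst s '1') := by
  have h0 : 0 ≤ PySem.Chars.find s.toList ['X'] := by
    have := PySem.Chars.neg_one_le_find s.toList ['X']
    rw [pv_find s] at h; omega
  have hdrop := pv_drop_find s h0
  have hlen : (PySem.Chars.find s.toList ['X']).toNat < s.toList.length := by
    by_contra h'
    rw [List.drop_eq_nil_of_le (by omega)] at hdrop
    simp at hdrop
  have htake : (s.toList.take (PySem.Chars.find s.toList ['X']).toNat).length
      = (PySem.Chars.find s.toList ['X']).toNat := by
    rw [List.length_take]; omega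
  have hnoX := pv_noX_take s.toList h0
  -- split enumerate(s) at the first 'X'
  have hsplit : PySem.List.enumerate s.toList 0
      = PySem.List.enumerate (s.toList.take (PySem.Chars.find s.toList ['X']).toNat) 0
        ++ (((PySem.Chars.find s.toList ['X']).toNat : Int), 'X')
          :: PySem.List.enumerate (s.toList.drop ((PySem.Chars.find s.toList ['X']).toNat + 1))
               (((PySem.Chars.find s.toList ['X']).toNat : Int) + 1) := by
    conv_lhs => rw [← List.take_append_drop (PySem.Chars.find s.toList ['X']).toNat s.toList]
    rw [PySem.List.enumerate_append, hdrop, PySem.List.enumerate_cons, htake]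
    simp
  -- the two inner folds agree
  have hinner : ∀ b : Char, b ≠ 'X' →
      (PySem.List.enumerate (pvSubst s b).toList 0).foldl pvExpandStep [(pvSubst s b).toList]
      = (PySem.List.enumerate (s.toList.drop ((PySem.Chars.find s.toList ['X']).toNat + 1))
           (((PySem.Chars.find s.toList ['X']).toNat : Int) + 1)).foldl pvExpandStep
          [s.toList.take (PySem.Chars.find s.toList ['X']).toNat
            ++ b :: s.toList.drop ((PySem.Chars.find s.toList ['X']).toNat + 1)] := by
    intro b hb
    rw [pvSubst_toList s b h]
    have hassoc : s.toList.take (PySem.Chars.find s.toList ['X']).toNat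
        ++ b :: s.toList.drop ((PySem.Chars.find s.toList ['X']).toNat + 1)
        = (s.toList.take (PySem.Chars.find s.toList ['X']).toNat ++ [b])
          ++ s.toList.drop ((PySem.Chars.find s.toList ['X']).toNat + 1) := by simp
    have hpre_noX : 'X' ∉ s.toList.take (PySem.Chars.find s.toList ['X']).toNat ++ [b] := by
      intro hmem
      rcases List.mem_append.mp hmem with h1 | h1
      · exact hnoX h1
      · simp at h1; exact hb h1.symm
    have hsplitb : PySem.List.enumerate
          (s.toList.take (PySem.Chars.find s.toList ['X']).toNat
            ++ b :: s.toList.drop ((PySem.Chars.find s.toList ['X']).toNat + 1)) 0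
        = PySem.List.enumerate (s.toList.take (PySem.Chars.find s.toList ['X']).toNat ++ [b]) 0
          ++ PySem.List.enumerate (s.toList.drop ((PySem.Chars.find s.toList ['X']).toNat + 1))
               (((PySem.Chars.find s.toList ['X']).toNat : Int) + 1) := by
      conv_lhs => rw [hassoc]
      rw [PySem.List.enumerate_append,
        show ((0 : Int) + ((s.toList.take (PySem.Chars.find s.toList ['X']).toNat ++ [b]).length : Int))
          = (((PySem.Chars.find s.toList ['X']).toNat : Int) + 1) from by
            have hlen2 : (s.toList.take (PySem.Chars.find s.toList ['X']).toNat ++ [b]).length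
                = (PySem.Chars.find s.toList ['X']).toNat + 1 := by
              simp [htake]
            rw [hlen2]; push_cast; ring]
    rw [hsplitb, List.foldl_append,
      pv_foldl_noX (s.toList.take (PySem.Chars.find s.toList ['X']).toNat ++ [b]) 0 _ hpre_noX]
  unfold pvExpandOne
  rw [hsplit, List.foldl_append, pv_foldl_noX _ _ _ hnoX, List.foldl_cons, pv_step_X]
  rw [show [s.toList.take (PySem.Chars.find s.toList ['X']).toNat
        ++ '0' :: s.toList.drop ((PySem.Chars.find s.toList ['X']).toNat + 1),
      s.toList.take (PySem.Chars.find s.toList ['X']).toNat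
        ++ '1' :: s.toList.drop ((PySem.Chars.find s.toList ['X']).toNat + 1)]
    = [s.toList.take (PySem.Chars.find s.toList ['X']).toNat
        ++ '0' :: s.toList.drop ((PySem.Chars.find s.toList ['X']).toNat + 1)]
      ++ [s.toList.take (PySem.Chars.find s.toList ['X']).toNat
        ++ '1' :: s.toList.drop ((PySem.Chars.find s.toList ['X']).toNat + 1)] from rfl]
  rw [pv_foldl_append, List.map_append]
  rw [hinner '0' (by decide), hinner '1' (by decide)]

theorem pv_main_noX (s : String) (hf : PySem.Str.find s "X" = -1) :
    get_addresses_recursive [s] = pvExpandOne s := by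
  have hmem : 'X' ∉ s.toList := by
    rw [pv_find s] at hf
    have := PySem.Chars.find_eq_neg_one_iff (s := s.toList) (sub := ['X'])
    intro hm
    exact (this.mp hf) ((List.singleton_infix_iff 'X' s.toList).mpr hm)
  rw [show get_addresses_recursive [s]
      = (if PySem.Str.find s "X" = -1 then [s]
         else get_addresses_recursive [pvSubst s '0'] ++ get_addresses_recursive [pvSubst s '1'])
        ++ [] from by rw [get_addresses_recursive]; rw [get_addresses_recursive]]
  rw [if_pos hf]
  unfold pvExpandOne
  rw [pv_foldl_noX _ _ _ hmem]
  simp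

theorem pv_main_aux (n : Nat) : ∀ (s : String), s.toList.count 'X' ≤ n →
    get_addresses_recursive [s] = pvExpandOne s := by
  induction n with
  | zero =>
    intro s hc
    by_cases hf : PySem.Str.find s "X" = -1
    · exact pv_main_noX s hf
    · exfalso
      rw [pv_find s] at hf
      have hmem : 'X' ∈ s.toList :=
        (List.singleton_infix_iff 'X' s.toList).mp ((PySem.Chars.find_ne_neg_one_iff s.toList ['X']).mp hf)
      have := List.count_pos_iff.mpr hmem
      omega
  | succ n ih =>
    intro s hc
    by_cases hf : PySem.Str.find s "X" = -1
    · exact pv_main_noX s hf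
    · rw [show get_addresses_recursive [s]
          = (if PySem.Str.find s "X" = -1 then [s]
             else get_addresses_recursive [pvSubst s '0'] ++ get_addresses_recursive [pvSubst s '1'])
            ++ [] from by rw [get_addresses_recursive]; rw [get_addresses_recursive]]
      rw [if_neg hf, List.append_nil]
      rw [ih (pvSubst s '0') (by have := pvCount_subst s '0' (by decide) hf; omega)]
      rw [ih (pvSubst s '1') (by have := pvCount_subst s '1' (by decide) hf; omega)]
      exact (pv_expandOne_split s hf).symm

theorem pv_main (s : String) : get_addresses_recursive [s] = pvExpandOne s :=
  pv_main_aux (s.toList.count 'X') s le_rfl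

theorem pv_A_cons (a : String) (rest : List String) :
    get_addresses_recursive (a :: rest) = get_addresses_recursive [a] ++ get_addresses_recursive rest := by
  rw [show get_addresses_recursive (a :: rest)
      = (if PySem.Str.find a "X" = -1 then [a]
         else get_addresses_recursive [pvSubst a '0'] ++ get_addresses_recursive [pvSubst a '1'])
        ++ get_addresses_recursive rest from by rw [get_addresses_recursive]]
  rw [show get_addresses_recursive [a]
      = (if PySem.Str.find a "X" = -1 then [a]
         else get_addresses_recursive [pvSubst a '0'] ++ get_addresses_recursive [pvSubst a '1'])
        ++ [] from by rw [get_addresses_recursive]; rw [get_addresses_recursive]]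
  rw [List.append_nil]

theorem pv_B_cons (a : String) (rest : List String) :
    get_addresses_recursive_alt (a :: rest) = pvExpandOne a ++ get_addresses_recursive_alt rest := by
  unfold get_addresses_recursive_alt
  rw [PySem.List.foldl_append_eq_flatMap, PySem.List.foldl_append_eq_flatMap]
  simp

theorem pv_total (xs : List String) : get_addresses_recursive xs = get_addresses_recursive_alt xs := by
  induction xs with
  | nil => simp [get_addresses_recursive, get_addresses_recursive_alt]
  | cons a rest ih => rw [pv_A_cons, pv_B_cons, pv_main, ih]

-- ===== VERDICT (by name: the statement is the Claim_ definition above) =====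
theorem get_addresses_recursive_spec : Claim_equal_get_addresses_recursive := by
  intro addr_Xs _
  exact pv_total addr_Xs
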